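-- pv_equiv track=rewrite | github.com/slave-blocker/voider_2 | voider_2/mymodule.py | replace_Element
-- ===== SOURCE A (Python) =====
-- def replace_Element(L, index, el):
--     temp=[]
--     i = 0
--     for element in L :
--         if( index == i ):
--             temp.append(el)
--         else :
--             temp.append(L[i])
--         i+=1
--     return temp
-- ===== SOURCE B (Python) =====
-- def replace_Element(L, index, el):
--     temp = list(L)
--     if 0 <= index < len(L):
--         temp[index] = el
--     return temp
-- ===== Notes on version B (the rewrite author's own statement) =====
-- stated objective: faster
-- what changed: Replaces the element-by-element rebuild loop (per-element index comparison and L[i] lookup/append) by a one-step bulk copy followed by a single guarded positional assignment.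
import Mathlib
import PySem

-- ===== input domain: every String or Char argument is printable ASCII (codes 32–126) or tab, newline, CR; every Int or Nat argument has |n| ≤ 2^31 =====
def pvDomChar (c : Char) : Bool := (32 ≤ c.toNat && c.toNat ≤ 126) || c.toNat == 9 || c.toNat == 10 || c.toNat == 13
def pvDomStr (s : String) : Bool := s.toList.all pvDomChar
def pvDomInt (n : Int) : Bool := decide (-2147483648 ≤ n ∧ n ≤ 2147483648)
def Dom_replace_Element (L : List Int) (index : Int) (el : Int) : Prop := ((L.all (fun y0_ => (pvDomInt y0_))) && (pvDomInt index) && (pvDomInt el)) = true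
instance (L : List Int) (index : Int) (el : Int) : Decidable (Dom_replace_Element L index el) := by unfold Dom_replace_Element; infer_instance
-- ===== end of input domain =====

-- B replaces A's element-by-element rebuild loop by a bulk copy plus one guarded
-- positional write; same O(n) cost, simpler decomposition.


-- ===== PORT A =====
-- for element in L: if index == i: temp.append(el) else: temp.append(L[i]); i += 1
-- (L[i] is always in range here, so pyGetD with default 0 is exact)
def replace_Element (L : List Int) (index : Int) (el : Int) : List Int :=
  (L.foldl
    (fun (st : List Int × Int) (_element : Int) =>
      (st.1 ++ [if index == st.2 then el else PySem.List.pyGetD L st.2 0], st.2 + 1))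
    ([], 0)).1

-- ===== PORT B =====
-- temp = list(L); if 0 <= index < len(L): temp[index] = el; return temp
def replace_Element_alt (L : List Int) (index : Int) (el : Int) : List Int :=
  if 0 ≤ index ∧ index < L.length then L.set index.toNat el else L

-- ===== PRECONDITION & SPEC =====
def Spec_replace_Element (L : List Int) (index : Int) (el : Int) (out : List Int) : Prop := out = replace_Element_alt L index el
instance (L : List Int) (index : Int) (el : Int) (out : List Int) : Decidable (Spec_replace_Element L index el out) := by unfold Spec_replace_Element; infer_instance

-- ===== CLAIM (what is proved, stated in full; the proofs are below) =====
def Claim_equal_replace_Element : Prop := ∀ (L : List Int) (index : Int) (el : Int), Dom_replace_Element L index el → Spec_replace_Element L index el (replace_Element L index el)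

-- ===== LEMMAS AND PROOFS =====

-- value of B as a structural recursion over the list with a running offset
def pvSpine (index el : Int) : List Int → Int → List Int
  | [], _ => []
  | x :: xs, k => (if index == k then el else x) :: pvSpine index el xs (k + 1)

theorem pvSpine_eq_alt (index el : Int) :
    ∀ (M : List Int) (k : Int),
      pvSpine index el M k =
        if 0 ≤ index - k ∧ index - k < M.length then M.set (index - k).toNat el else M := by
  intro M
  induction M with
  | nil => intro k; simp [pvSpine]
  | cons x xs ih =>
    intro k
    simp only [pvSpine, ih (k + 1)]
    by_cases hk : index = k
    · subst hk
      simp [show ¬ (0:Int) ≤ -1 from by omega]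
    · have hne : (index == k) = false := by simp [hk]
      simp only [hne, Bool.false_eq_true]
      by_cases h : 0 ≤ index - k ∧ index - k < (x :: xs).length
      · have h' : 0 ≤ index - (k + 1) ∧ index - (k + 1) < xs.length := by
          simp at h ⊢; omega
        rw [if_pos h', if_pos h]
        have : (index - k).toNat = (index - (k + 1)).toNat + 1 := by omega
        simp [this]
      · have h' : ¬ (0 ≤ index - (k + 1) ∧ index - (k + 1) < xs.length) := by
          simp at h ⊢; omega
        rw [if_neg h', if_neg h]
        simp

-- the loop invariant for A's fold: iterating over the suffix L.drop k.toNat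
theorem pvLoop_inv (L : List Int) (index el : Int) :
    ∀ (M acc : List Int) (k : Int), 0 ≤ k → L.drop k.toNat = M →
      (M.foldl
        (fun (st : List Int × Int) (_element : Int) =>
          (st.1 ++ [if index == st.2 then el else PySem.List.pyGetD L st.2 0], st.2 + 1))
        (acc, k)).1 = acc ++ pvSpine index el M k := by
  intro M
  induction M with
  | nil => intro acc k _ _; simp [pvSpine]
  | cons x xs ih =>
    intro acc k hk hdrop
    have hlt : k.toNat < L.length := by
      by_contra h
      simp [List.drop_eq_nil_of_le (by omega : L.length ≤ k.toNat)] at hdrop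
    have hx : PySem.List.pyGetD L k 0 = x := by
      have hgx : L[k.toNat] = x := by
        have := List.getElem_drop (xs := L) (i := k.toNat) (j := 0) (h := by simp [hdrop])
        simp [hdrop] at this
        simpa using this.symm
      rw [PySem.List.pyGetD_eq_getElem L 0 hk (by omega), hgx]
    have hdrop' : L.drop (k + 1).toNat = xs := by
      have : (k + 1).toNat = k.toNat + 1 := by omega
      rw [this, ← List.drop_drop]
      simp [hdrop]
    simp only [List.foldl_cons, hx]
    rw [ih (acc ++ [if index == k then el else x]) (k + 1) (by omega) hdrop']
    simp [pvSpine]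

-- ===== VERDICT (by name: the statement is the Claim_ definition above) =====
theorem replace_Element_spec : Claim_equal_replace_Element := by
  intro L index el _
  unfold Spec_replace_Element replace_Element replace_Element_alt
  rw [pvLoop_inv L index el L [] 0 le_rfl (by simp)]
  rw [pvSpine_eq_alt]
  simp
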